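-- pv_equiv track=rewrite | github.com/DRAGONDAR222/esercizi | Ripasso/Raggruppa_voti_per_giudizio.py | raggruppa_giudizi
-- ===== SOURCE A (Python) =====
-- def raggruppa_giudizi(voti: list[int]) -> dict[str, list[int]]:
--
--     giudizi:dict[str, list[int]] = {'insufficiente':[],'sufficiente':[],'buono':[],'ottimo':[]}
--
--     for i in voti:
--         if i in range(0,6):
--             giudizi['insufficiente'].append(i)
--         if i == 6:
--             giudizi['sufficiente'].append(i)
--         if i in range(7,9):
--             giudizi['buono'].append(i)
--         if i in range(9,11):
--             giudizi['ottimo'].append(i)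
--     return giudizi
-- ===== SOURCE B (Python) =====
-- def raggruppa_giudizi(voti: list[int]) -> dict[str, list[int]]:
--     return {
--         'insufficiente': [i for i in voti if i in range(0, 6)],
--         'sufficiente':   [i for i in voti if i == 6],
--         'buono':         [i for i in voti if i in range(7, 9)],
--         'ottimo':        [i for i in voti if i in range(9, 11)],
--     }
-- ===== Notes on version B (the rewrite author's own statement) =====
-- stated objective: simpler
-- what changed: Replaces the single classifying loop that appends into four pre-built dict buckets with a dict literal of four independent filtering comprehensions, one per category.
import Mathlib
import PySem

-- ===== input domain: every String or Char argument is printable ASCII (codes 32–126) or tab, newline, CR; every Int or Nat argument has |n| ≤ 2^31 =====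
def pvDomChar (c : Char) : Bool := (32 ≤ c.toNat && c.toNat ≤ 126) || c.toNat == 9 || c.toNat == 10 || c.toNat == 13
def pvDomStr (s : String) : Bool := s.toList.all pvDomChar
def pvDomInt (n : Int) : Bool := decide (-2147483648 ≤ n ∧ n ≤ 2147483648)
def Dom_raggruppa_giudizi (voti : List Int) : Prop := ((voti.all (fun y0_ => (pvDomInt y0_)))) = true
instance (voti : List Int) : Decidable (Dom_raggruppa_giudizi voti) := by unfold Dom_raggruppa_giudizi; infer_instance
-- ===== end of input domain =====

-- B replaces A's single classifying loop appending into four dict buckets by a dict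
-- literal of four independent filtering passes (objective: simpler).

-- ===== PORT A =====
-- one loop over voti, appending i into the matching bucket(s) of a pre-built dict
def raggruppa_giudizi (voti : List Int) : List (String × List Int) :=
  let init : PySem.Dict String (List Int) :=
    PySem.Dict.ofList [("insufficiente", []), ("sufficiente", []), ("buono", []), ("ottimo", [])]
  (voti.foldl (fun d i =>
    let d := if 0 ≤ i && i < 6 then d.modify "insufficiente" [] (· ++ [i]) else d  -- i in range(0,6)
    let d := if i == 6 then d.modify "sufficiente" [] (· ++ [i]) else d
    let d := if 7 ≤ i && i < 9 then d.modify "buono" [] (· ++ [i]) else d          -- i in range(7,9)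
    if 9 ≤ i && i < 11 then d.modify "ottimo" [] (· ++ [i]) else d) init).items    -- i in range(9,11)

-- ===== PORT B =====
-- four independent filters, one per category
def raggruppa_giudizi_alt (voti : List Int) : List (String × List Int) :=
  [("insufficiente", voti.filter (fun i => 0 ≤ i && i < 6)),
   ("sufficiente",   voti.filter (fun i => i == 6)),
   ("buono",         voti.filter (fun i => 7 ≤ i && i < 9)),
   ("ottimo",        voti.filter (fun i => 9 ≤ i && i < 11))]

-- ===== PRECONDITION & SPEC =====
def Spec_raggruppa_giudizi (voti : List Int) (out : List (String × List Int)) : Prop := out = raggruppa_giudizi_alt voti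
instance (voti : List Int) (out : List (String × List Int)) : Decidable (Spec_raggruppa_giudizi voti out) := by unfold Spec_raggruppa_giudizi; infer_instance

-- ===== CLAIM (what is proved, stated in full; the proofs are below) =====
def Claim_equal_raggruppa_giudizi : Prop := ∀ (voti : List Int), Dom_raggruppa_giudizi voti → Spec_raggruppa_giudizi voti (raggruppa_giudizi voti)

-- ===== LEMMAS AND PROOFS =====

-- computing one bucket-append on the literal four-key dict, one lemma per key
theorem modIns (a b c o : List Int) (f : List Int → List Int) :
    (PySem.Dict.mk [("insufficiente", a), ("sufficiente", b), ("buono", c), ("ottimo", o)]).modify "insufficiente" [] f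
    = PySem.Dict.mk [("insufficiente", f a), ("sufficiente", b), ("buono", c), ("ottimo", o)] := by
  simp [PySem.Dict.modify, PySem.Dict.get?, PySem.Dict.insert, PySem.Dict.getD, PySem.Dict.contains]

theorem modSuf (a b c o : List Int) (f : List Int → List Int) :
    (PySem.Dict.mk [("insufficiente", a), ("sufficiente", b), ("buono", c), ("ottimo", o)]).modify "sufficiente" [] f
    = PySem.Dict.mk [("insufficiente", a), ("sufficiente", f b), ("buono", c), ("ottimo", o)] := by
  simp [PySem.Dict.modify, PySem.Dict.get?, PySem.Dict.insert, PySem.Dict.getD, PySem.Dict.contains]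

theorem modBuo (a b c o : List Int) (f : List Int → List Int) :
    (PySem.Dict.mk [("insufficiente", a), ("sufficiente", b), ("buono", c), ("ottimo", o)]).modify "buono" [] f
    = PySem.Dict.mk [("insufficiente", a), ("sufficiente", b), ("buono", f c), ("ottimo", o)] := by
  simp [PySem.Dict.modify, PySem.Dict.get?, PySem.Dict.insert, PySem.Dict.getD, PySem.Dict.contains]

theorem modOtt (a b c o : List Int) (f : List Int → List Int) :
    (PySem.Dict.mk [("insufficiente", a), ("sufficiente", b), ("buono", c), ("ottimo", o)]).modify "ottimo" [] f
    = PySem.Dict.mk [("insufficiente", a), ("sufficiente", b), ("buono", c), ("ottimo", f o)] := by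
  simp [PySem.Dict.modify, PySem.Dict.get?, PySem.Dict.insert, PySem.Dict.getD, PySem.Dict.contains]

-- loop invariant: folding over voti from a dict whose four buckets hold a, b, c, o
-- yields the dict with each filter's matches appended to its bucket
theorem raggruppa_loop (voti : List Int) (a b c o : List Int) :
    (voti.foldl (fun d i =>
      let d := if 0 ≤ i ∧ i < 6 then d.modify "insufficiente" [] (· ++ [i]) else d
      let d := if i = 6 then d.modify "sufficiente" [] (· ++ [i]) else d
      let d := if 7 ≤ i ∧ i < 9 then d.modify "buono" [] (· ++ [i]) else d
      if 9 ≤ i ∧ i < 11 then d.modify "ottimo" [] (· ++ [i]) else d)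
      (PySem.Dict.mk [("insufficiente", a), ("sufficiente", b), ("buono", c), ("ottimo", o)])).items
    = [("insufficiente", a ++ voti.filter (fun i => decide (0 ≤ i ∧ i < 6))),
       ("sufficiente",   b ++ voti.filter (fun i => i == 6)),
       ("buono",         c ++ voti.filter (fun i => decide (7 ≤ i ∧ i < 9))),
       ("ottimo",        o ++ voti.filter (fun i => decide (9 ≤ i ∧ i < 11)))] := by
  induction voti generalizing a b c o with
  | nil => simp [PySem.Dict.items]
  | cons i rest ih =>
    simp only [List.foldl_cons, List.filter_cons]
    by_cases h1 : 0 ≤ i ∧ i < 6 <;> by_cases h2 : i = 6 <;>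
      by_cases h3 : 7 ≤ i ∧ i < 9 <;> by_cases h4 : 9 ≤ i ∧ i < 11 <;>
      simp [h1, h2, h3, h4, modIns, modSuf, modBuo, modOtt, ih]

-- ===== VERDICT (by name: the statement is the Claim_ definition above) =====
theorem raggruppa_giudizi_spec : Claim_equal_raggruppa_giudizi := by
  intro voti _
  show _ = _
  simpa [raggruppa_giudizi, raggruppa_giudizi_alt, PySem.Dict.ofList] using
    raggruppa_loop voti [] [] [] []
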